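-- pv_equiv track=rewrite | github.com/griels/pypy-sc | pypy/translator/cli/support.py | string_literal
-- ===== SOURCE A (Python) =====
-- def string_literal(s):
--     def char_repr(c):
--         if c in '\\"': return '\\' + c
--         if ' ' <= c < '\x7F': return c
--         if c == '\n': return '\\n'
--         if c == '\t': return '\\t'
--         raise ValueError
--     def line_repr(s):
--         return ''.join([char_repr(c) for c in s])
--     def array_repr(s):
--         return ' '.join(['%x 00' % ord(c) for c in s+'\001'])
--
--     try:
--         return '"%s"' % line_repr(s)
--     except ValueError:
--         return "bytearray ( %s )" % array_repr(s)
-- ===== SOURCE B (Python) =====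
-- def string_literal(s):
--     def esc(c):
--         if c in '\\"': return '\\' + c
--         if c == '\n': return '\\n'
--         if c == '\t': return '\\t'
--         return c
--     if all(' ' <= c < '\x7F' or c in '\n\t' for c in s):
--         return '"' + ''.join(esc(c) for c in s) + '"'
--     return 'bytearray ( %s )' % ' '.join('%x 00' % ord(c) for c in s + '\001')
-- ===== Notes on version B (the rewrite author's own statement) =====
-- stated objective: simpler
-- what changed: Replaces the exception-driven try/except fallback with an explicit all()-predicate deciding the branch up front, so the escape function is total and no exception machinery is needed.
import Mathlib
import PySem

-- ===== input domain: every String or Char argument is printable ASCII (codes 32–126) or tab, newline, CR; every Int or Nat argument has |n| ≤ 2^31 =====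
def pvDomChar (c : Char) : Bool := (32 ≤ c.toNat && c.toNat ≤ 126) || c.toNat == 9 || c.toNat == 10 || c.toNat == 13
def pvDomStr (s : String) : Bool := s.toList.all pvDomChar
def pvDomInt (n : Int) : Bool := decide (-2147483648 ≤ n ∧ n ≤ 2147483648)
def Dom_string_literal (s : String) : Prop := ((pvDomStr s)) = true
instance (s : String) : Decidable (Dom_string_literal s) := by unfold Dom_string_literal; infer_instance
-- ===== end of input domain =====

-- B is a simpler re-decomposition: an explicit all()-predicate chooses the branch instead of A's try/except; same outputs.

-- shared formatting helper: '%x 00' % ord(c) (lowercase hex, no padding), used verbatim by both Pythons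
def pvHexDigit (n : Nat) : Char := if n < 10 then Char.ofNat (48 + n) else Char.ofNat (87 + n)
def pvHex : Nat → List Char
  | n => if h : n < 16 then [pvHexDigit n]
         else pvHex (n / 16) ++ [pvHexDigit (n % 16)]
  decreasing_by exact Nat.div_lt_self (by omega) (by omega)
def pvArrayRepr (cs : List Char) : String :=
  String.intercalate " " ((cs ++ ['\x01']).map (fun c => String.mk (pvHex c.toNat) ++ " 00"))

-- ===== PORT A =====
-- char_repr: raises ValueError ↦ none
def pvCharRepr (c : Char) : Option String :=
  if c = '\\' ∨ c = '"' then some (String.mk ['\\', c])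
  else if 32 ≤ c.toNat ∧ c.toNat < 127 then some (String.mk [c])
  else if c = '\n' then some (String.mk ['\\', 'n'])
  else if c = '\t' then some (String.mk ['\\', 't'])
  else none

-- line_repr: ''.join, propagating the first ValueError
def pvLineRepr : List Char → Option String
  | [] => some ""
  | c :: cs =>
    match pvCharRepr c, pvLineRepr cs with
    | some r, some rs => some (r ++ rs)
    | _, _ => none

def string_literal (s : String) : String :=
  match pvLineRepr s.toList with
  | some r => "\"" ++ r ++ "\""
  | none => "bytearray ( " ++ pvArrayRepr s.toList ++ " )"

-- ===== PORT B =====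
def pvEsc (c : Char) : String :=
  if c = '\\' ∨ c = '"' then String.mk ['\\', c]
  else if c = '\n' then String.mk ['\\', 'n']
  else if c = '\t' then String.mk ['\\', 't']
  else String.mk [c]

def pvOk (c : Char) : Bool :=
  (32 ≤ c.toNat && c.toNat < 127) || c = '\n' || c = '\t'

def string_literal_alt (s : String) : String :=
  if s.toList.all pvOk then
    "\"" ++ String.join (s.toList.map pvEsc) ++ "\""
  else
    "bytearray ( " ++ pvArrayRepr s.toList ++ " )"

-- ===== PRECONDITION & SPEC =====
def Spec_string_literal (s : String) (out : String) : Prop := out = string_literal_alt s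
instance (s : String) (out : String) : Decidable (Spec_string_literal s out) := by unfold Spec_string_literal; infer_instance

-- ===== CLAIM (what is proved, stated in full; the proofs are below) =====
def Claim_equal_string_literal : Prop := ∀ (s : String), Dom_string_literal s → Spec_string_literal s (string_literal s)

-- ===== LEMMAS AND PROOFS =====

theorem pvCharRepr_eq (c : Char) :
    pvCharRepr c = if pvOk c then some (pvEsc c) else none := by
  unfold pvCharRepr pvEsc pvOk
  by_cases h1 : c = '\\' ∨ c = '"'
  · rcases h1 with h | h <;> subst h <;> decide
  · by_cases h2 : 32 ≤ c.toNat ∧ c.toNat < 127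
    · have hn : c ≠ '\n' := by rintro rfl; simp at h2
      have ht : c ≠ '\t' := by rintro rfl; simp at h2
      simp [h1, h2, hn, ht]
    · by_cases h3 : c = '\n'
      · subst h3; decide
      · by_cases h4 : c = '\t'
        · subst h4; decide
        · simp [h1, h2, h3, h4]

theorem pv_foldl_append (l : List String) (a : String) :
    List.foldl (fun r s => r ++ s) a l = a ++ List.foldl (fun r s => r ++ s) "" l := by
  induction l generalizing a with
  | nil => simp
  | cons x xs ih =>
    simp only [List.foldl_cons]
    rw [ih, ih ("" ++ x), String.empty_append, String.append_assoc]

theorem pvLineRepr_eq (cs : List Char) :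
    pvLineRepr cs = if cs.all pvOk then some (String.join (cs.map pvEsc)) else none := by
  induction cs with
  | nil => simp [pvLineRepr, String.join]
  | cons c cs ih =>
    simp only [pvLineRepr, pvCharRepr_eq, ih, List.all_cons, List.map_cons]
    by_cases hc : pvOk c
    · by_cases hcs : cs.all pvOk
      · simp only [hc, hcs, Bool.and_self, if_true]
        rw [String.join, String.join, List.foldl_cons, String.empty_append]
        exact congrArg some (pv_foldl_append _ _).symm
      · simp [hc, hcs]
    · simp [hc]

-- ===== VERDICT (by name: the statement is the Claim_ definition above) =====
theorem string_literal_spec : Claim_equal_string_literal := by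
  intro s _
  unfold Spec_string_literal string_literal string_literal_alt
  rw [pvLineRepr_eq]
  by_cases h : s.toList.all pvOk <;> simp [h]
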